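-- pv_equiv track=rewrite | github.com/dlangk/yatzy | yatzy/engine.py | n_kind_scoring
-- ===== SOURCE A (Python) =====
-- def n_kind_scoring(dices, die_value=None, n=None):
--     times_scored = 0
--     score = 0
--     for die in dices:
--         if die == die_value:
--             if times_scored < n:
--                 score += die
--                 times_scored += 1
--     return score
-- ===== SOURCE B (Python) =====
-- def n_kind_scoring(dices, die_value=None, n=None):
--     count = dices.count(die_value)
--     if count == 0:
--         return 0
--     return max(0, min(count, n)) * die_value
-- ===== Notes on version B (the rewrite author's own statement) =====
-- stated objective: simpler
-- what changed: Replaces the stateful loop (conditional accumulation capped by a mutable counter) with a closed-form expression: count matches once, then max(0, min(count, n)) * die_value.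
import Mathlib
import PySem

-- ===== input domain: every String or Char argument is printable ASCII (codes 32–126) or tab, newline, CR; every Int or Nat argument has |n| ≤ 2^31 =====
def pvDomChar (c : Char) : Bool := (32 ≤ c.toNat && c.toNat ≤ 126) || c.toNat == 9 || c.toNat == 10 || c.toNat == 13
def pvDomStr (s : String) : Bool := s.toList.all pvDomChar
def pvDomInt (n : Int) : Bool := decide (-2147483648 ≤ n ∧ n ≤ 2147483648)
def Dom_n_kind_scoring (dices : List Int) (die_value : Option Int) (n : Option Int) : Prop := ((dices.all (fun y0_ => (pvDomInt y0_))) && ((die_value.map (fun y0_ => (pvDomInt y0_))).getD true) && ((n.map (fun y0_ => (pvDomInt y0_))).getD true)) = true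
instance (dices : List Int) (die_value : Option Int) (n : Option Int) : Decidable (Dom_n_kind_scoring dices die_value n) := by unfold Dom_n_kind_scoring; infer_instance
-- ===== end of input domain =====

-- B replaces A's stateful conditional-accumulation loop by a closed form: count matches once, then max 0 (min count n) * die_value (objective: simpler).


-- ===== PORT A =====
def n_kind_scoring (dices : List Int) (die_value : Option Int) (n : Option Int) : Int :=
  (dices.foldl (fun (st : Int × Int) die =>
      if some die == die_value then
        match n with
        | some k => if st.1 < k then (st.1 + 1, st.2 + die) else st
        | none => st   -- Python raises TypeError at 'times_scored < n' here; such inputs are excluded by Pre_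
      else st) (0, 0)).2

-- ===== PORT B =====
def n_kind_scoring_alt (dices : List Int) (die_value : Option Int) (n : Option Int) : Int :=
  -- count = dices.count(die_value): ints never equal None
  let count : Int := match die_value with
    | none => 0
    | some v => PySem.List.count dices v
  if count = 0 then 0
  else match die_value, n with
    | some v, some k => max 0 (min count k) * v
    | _, _ => 0   -- count > 0 forces die_value = some _; n = none: Python raises TypeError at min(count, n), excluded by Pre_

-- ===== PRECONDITION & SPEC =====
-- Pre_ excludes exactly the inputs on which A raises TypeError: n is None while some die equals die_value.
def Pre_n_kind_scoring (dices : List Int) (die_value : Option Int) (n : Option Int) : Prop :=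
  (n.isSome || (match die_value with | none => true | some v => !(dices.contains v))) = true
instance (dices : List Int) (die_value : Option Int) (n : Option Int) : Decidable (Pre_n_kind_scoring dices die_value n) := by unfold Pre_n_kind_scoring; infer_instance
def pvWitness_n_kind_scoring : List Int × Option Int × Option Int := ([1, 2, 1, 3], some 1, some 2)
def Spec_n_kind_scoring (dices : List Int) (die_value : Option Int) (n : Option Int) (out : Int) : Prop := out = n_kind_scoring_alt dices die_value n
instance (dices : List Int) (die_value : Option Int) (n : Option Int) (out : Int) : Decidable (Spec_n_kind_scoring dices die_value n out) := by unfold Spec_n_kind_scoring; infer_instance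

-- ===== CLAIM (what is proved, stated in full; the proofs are below) =====
def Claim_equal_n_kind_scoring : Prop := ∀ (dices : List Int) (die_value : Option Int) (n : Option Int), Dom_n_kind_scoring dices die_value n → Pre_n_kind_scoring dices die_value n → Spec_n_kind_scoring dices die_value n (n_kind_scoring dices die_value n)

-- ===== LEMMAS AND PROOFS =====

-- A's loop with n = some k, starting from (t, s): closed form of the final score.
theorem loopA_closed (v k : Int) (l : List Int) : ∀ (t s : Int),
    (l.foldl (fun (st : Int × Int) die =>
        if some die == some v then (if st.1 < k then (st.1 + 1, st.2 + die) else st) else st) (t, s)).2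
      = s + v * max 0 (min (l.count v : Int) (k - t)) := by
  induction l with
  | nil => intro t s; simp
  | cons die rest ih =>
    intro t s
    by_cases h : die = v
    · subst h
      have hc : (0 : Int) ≤ (rest.count die : Int) := by positivity
      by_cases ht : t < k
      · simp only [List.foldl_cons, beq_self_eq_true, if_true, if_pos ht]
        rw [ih, List.count_cons_self]
        have hm : max (0:Int) (min ((rest.count die : Int) + 1) (k - t))
            = 1 + max 0 (min (rest.count die : Int) (k - (t + 1))) := by omega
        push_cast
        rw [hm]; ring
      · simp only [List.foldl_cons, beq_self_eq_true, if_true, if_neg ht]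
        rw [ih, List.count_cons_self]
        have hm1 : max (0:Int) (min ((rest.count die : Int) + 1) (k - t)) = 0 := by omega
        have hm2 : max (0:Int) (min ((rest.count die : Int)) (k - t)) = 0 := by omega
        push_cast
        rw [hm1, hm2]
    · have hb : (some die == some v) = false := by simp [h]
      simp only [List.foldl_cons, hb, Bool.false_eq_true, if_false]
      rw [ih, List.count_cons_of_ne h]

-- When no element matches die_value, A's loop leaves the state untouched.
theorem loopA_nomatch (dv : Option Int) (n : Option Int) (l : List Int)
    (h : ∀ x ∈ l, (some x == dv) = false) :
    (l.foldl (fun (st : Int × Int) die =>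
        if some die == dv then
          match n with
          | some k => if st.1 < k then (st.1 + 1, st.2 + die) else st
          | none => st
        else st) ((0 : Int), (0 : Int))).2 = 0 := by
  induction l with
  | nil => rfl
  | cons x rest ih =>
    simp only [List.foldl_cons, h x (List.mem_cons_self), Bool.false_eq_true, if_false]
    exact ih (fun y hy => h y (List.mem_cons_of_mem _ hy))

-- ===== VERDICT (by name: the statement is the Claim_ definition above) =====
theorem n_kind_scoring_spec : Claim_equal_n_kind_scoring := by
  intro dices dv n _ hpre
  unfold Spec_n_kind_scoring n_kind_scoring n_kind_scoring_alt
  cases dv with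
  | none =>
    rw [loopA_nomatch _ _ _ (fun x _ => rfl)]
    simp
  | some v =>
    by_cases hcount : PySem.List.count dices v = 0
    · have hv : ¬ v ∈ dices := by
        rw [PySem.List.count_eq] at hcount
        intro hm
        have := List.count_pos_iff.mpr hm
        omega
      rw [loopA_nomatch _ _ _ (fun x hx => by
        simp only [Option.some.injEq, beq_eq_false_iff_ne, ne_eq]
        intro he; exact hv (he ▸ hx))]
      simp
      intro h0
      exact absurd (List.count_eq_zero_of_not_mem hv) h0
    · cases n with
      | none =>
        exfalso
        unfold Pre_n_kind_scoring at hpre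
        simp only [Option.isSome_none, Bool.false_or, Bool.not_eq_true', List.contains_eq_mem,
          decide_eq_false_iff_not] at hpre
        apply hcount
        rw [PySem.List.count_eq]
        simp [List.count_eq_zero_of_not_mem hpre]
      | some k =>
        rw [show (fun (st : Int × Int) die =>
            if some die == some v then
              (match (some k : Option Int) with
               | some k => if st.1 < k then (st.1 + 1, st.2 + die) else st
               | none => st)
            else st)
          = (fun (st : Int × Int) die =>
            if some die == some v then (if st.1 < k then (st.1 + 1, st.2 + die) else st) else st) from rfl]
        rw [loopA_closed]
        rw [PySem.List.count_eq] at hcount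
        have hne : (↑(List.count v dices) : Int) ≠ 0 := by exact_mod_cast hcount
        simp [PySem.List.count_eq, sub_zero, mul_comm]
        intro hc
        exact absurd hc hcount
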